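-- pv_equiv track=rewrite | github.com/pavelraiden/noktvrn_ai_artist | artist_builder/trend_analyzer/artist_compatibility_analyzer.py | _are_terms_related
-- ===== SOURCE A (Python) =====
-- def _are_terms_related(term1: str, term2: str) -> bool:
--     """
--     Check if two terms are related.
--
--     Args:
--         term1: First term
--         term2: Second term
--
--     Returns:
--         True if the terms are related, False otherwise
--     """
--     # Convert to lowercase for comparison
--     term1 = term1.lower()
--     term2 = term2.lower()
--
--     # Direct match
--     if term1 == term2:
--         return True
--
--     # Check if one term contains the other
--     if term1 in term2 or term2 in term1:
--         return True
--
--     # Check for related terms using a simple mapping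
--     related_terms_map = {
--         "electronic": ["synth", "digital", "electronic", "edm"],
--         "analog": ["warm", "vintage", "tape", "analog"],
--         "experimental": ["avant-garde", "unconventional", "innovative", "experimental"],
--         "minimal": ["minimalist", "clean", "sparse", "minimal"],
--         "atmospheric": ["ambient", "ethereal", "spacious", "atmospheric"],
--         "retro": ["nostalgic", "vintage", "throwback", "retro"],
--         "futuristic": ["forward-thinking", "cutting-edge", "futuristic", "modern"],
--         "organic": ["natural", "acoustic", "warm", "organic"],
--         "urban": ["city", "street", "urban", "metropolitan"],
--         "emotional": ["emotive", "passionate", "sentimental", "emotional"]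
--     }
--
--     # Check if terms are in the same related group
--     for key, related in related_terms_map.items():
--         if term1 in related and term2 in related:
--             return True
--         if (term1 == key or term1 in related) and (term2 == key or term2 in related):
--             return True
--
--     return False
-- ===== SOURCE B (Python) =====
-- RELATED_TERMS_MAP = {
--     "electronic": ["synth", "digital", "electronic", "edm"],
--     "analog": ["warm", "vintage", "tape", "analog"],
--     "experimental": ["avant-garde", "unconventional", "innovative", "experimental"],
--     "minimal": ["minimalist", "clean", "sparse", "minimal"],
--     "atmospheric": ["ambient", "ethereal", "spacious", "atmospheric"],
--     "retro": ["nostalgic", "vintage", "throwback", "retro"],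
--     "futuristic": ["forward-thinking", "cutting-edge", "futuristic", "modern"],
--     "organic": ["natural", "acoustic", "warm", "organic"],
--     "urban": ["city", "street", "urban", "metropolitan"],
--     "emotional": ["emotive", "passionate", "sentimental", "emotional"],
-- }
--
-- # Inverted index built once: every term (and every group key) -> the SET of
-- # group keys whose group contains it ('warm'/'vintage' belong to two groups).
-- _GROUPS_OF = {}
-- for _key, _related in RELATED_TERMS_MAP.items():
--     for _t in (_key, *_related):
--         _GROUPS_OF.setdefault(_t, set()).add(_key)
--
--
-- def _are_terms_related(term1: str, term2: str) -> bool: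
--     term1 = term1.lower()
--     term2 = term2.lower()
--     if term1 == term2:
--         return True
--     if term1 in term2 or term2 in term1:
--         return True
--     g1 = _GROUPS_OF.get(term1, set())
--     g2 = _GROUPS_OF.get(term2, set())
--     return not g1.isdisjoint(g2)
-- ===== Notes on version B (the rewrite author's own statement) =====
-- stated objective: idiomatic
-- what changed: The per-call scan over all ten groups is replaced by an inverted index built once at module load (term -> set of group keys, since 'warm'/'vintage' belong to two groups); relatedness becomes two dict lookups plus a set-disjointness test.
import Mathlib
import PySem

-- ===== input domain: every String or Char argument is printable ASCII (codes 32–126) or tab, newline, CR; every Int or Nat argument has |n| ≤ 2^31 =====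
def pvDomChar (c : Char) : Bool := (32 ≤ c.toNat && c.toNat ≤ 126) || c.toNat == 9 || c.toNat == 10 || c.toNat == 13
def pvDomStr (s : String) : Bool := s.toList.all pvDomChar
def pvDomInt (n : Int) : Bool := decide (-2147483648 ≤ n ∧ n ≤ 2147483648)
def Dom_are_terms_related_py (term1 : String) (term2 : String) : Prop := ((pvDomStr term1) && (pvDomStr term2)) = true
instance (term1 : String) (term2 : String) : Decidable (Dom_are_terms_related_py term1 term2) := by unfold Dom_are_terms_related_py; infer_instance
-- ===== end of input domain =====

-- B replaces A's per-call scan over the ten related-term groups by an inverted index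
-- (term -> set of group keys) built once, queried by two lookups and a disjointness test (idiomatic; same observable results).

-- the related_terms_map literal both Pythons carry (insertion order)
def relatedGroups : List (String × List String) :=
  [("electronic", ["synth", "digital", "electronic", "edm"]),
   ("analog", ["warm", "vintage", "tape", "analog"]),
   ("experimental", ["avant-garde", "unconventional", "innovative", "experimental"]),
   ("minimal", ["minimalist", "clean", "sparse", "minimal"]),
   ("atmospheric", ["ambient", "ethereal", "spacious", "atmospheric"]),
   ("retro", ["nostalgic", "vintage", "throwback", "retro"]),
   ("futuristic", ["forward-thinking", "cutting-edge", "futuristic", "modern"]),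
   ("organic", ["natural", "acoustic", "warm", "organic"]),
   ("urban", ["city", "street", "urban", "metropolitan"]),
   ("emotional", ["emotive", "passionate", "sentimental", "emotional"])]

-- ===== PORT A =====
-- A's 'for key, related in related_terms_map.items(): … return True … return False' loop
def pyGroupLoop (t1 : String) (t2 : String) : List (String × List String) → Bool
  | [] => false
  | (key, rel) :: rest =>
    if rel.contains t1 && rel.contains t2 then true
    else if (t1 == key || rel.contains t1) && (t2 == key || rel.contains t2) then true
    else pyGroupLoop t1 t2 rest

def are_terms_related_py (term1 : String) (term2 : String) : Bool :=
  let t1 := PySem.Str.lower term1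
  let t2 := PySem.Str.lower term2
  if t1 == t2 then true
  else if PySem.Str.isIn t1 t2 || PySem.Str.isIn t2 t1 then true
  else pyGroupLoop t1 t2 relatedGroups

-- ===== PORT B =====
-- Source B's module-level index build: for key, related in MAP.items(): for t in (key, *related): idx.setdefault(t, set()).add(key)
-- ('setdefault(t, set()).add(key)' mutates the stored set; ported as getD / Set.add / insert, which is the same dict state)
def groupsOf : PySem.Dict String (PySem.Set String) :=
  relatedGroups.foldl
    (fun d kr =>
      (kr.1 :: kr.2).foldl
        (fun d t => d.insert t (PySem.Set.add (d.getD t PySem.Set.empty) kr.1)) d)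
    PySem.Dict.empty

def are_terms_related_py_alt (term1 : String) (term2 : String) : Bool :=
  let t1 := PySem.Str.lower term1
  let t2 := PySem.Str.lower term2
  if t1 == t2 then true
  else if PySem.Str.isIn t1 t2 || PySem.Str.isIn t2 t1 then true
  else
    let g1 := groupsOf.getD t1 PySem.Set.empty
    let g2 := groupsOf.getD t2 PySem.Set.empty
    !(PySem.Set.isdisjoint g1 g2)

-- ===== PRECONDITION & SPEC =====
def Spec_are_terms_related_py (term1 : String) (term2 : String) (out : Bool) : Prop := out = are_terms_related_py_alt term1 term2
instance (term1 : String) (term2 : String) (out : Bool) : Decidable (Spec_are_terms_related_py term1 term2 out) := by unfold Spec_are_terms_related_py; infer_instance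

-- ===== CLAIM (what is proved, stated in full; the proofs are below) =====
def Claim_equal_are_terms_related_py : Prop := ∀ (term1 : String) (term2 : String), Dom_are_terms_related_py term1 term2 → Spec_are_terms_related_py term1 term2 (are_terms_related_py term1 term2)

-- ===== LEMMAS AND PROOFS =====

-- the inner 'for t in (key, *related)' loop: what ends up in the entry for t
lemma mem_getD_inner (ms : List String) (k : String)
    (d : PySem.Dict String (PySem.Set String)) (t k' : String) :
    k' ∈ (ms.foldl (fun d t => d.insert t (PySem.Set.add (d.getD t PySem.Set.empty) k)) d).getD t PySem.Set.empty
      ↔ k' ∈ d.getD t PySem.Set.empty ∨ (k' = k ∧ t ∈ ms) := by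
  induction ms generalizing d with
  | nil => simp
  | cons m ms ih =>
    rw [List.foldl_cons, ih, PySem.Dict.getD_insert]
    by_cases h : t = m
    · subst h
      rw [if_pos rfl]
      simp only [PySem.Set.mem_add, List.mem_cons]
      tauto
    · simp only [if_neg h, List.mem_cons]
      tauto

-- the outer build loop: the index entry for t accumulates the keys of groups containing t
lemma mem_getD_build (gs : List (String × List String))
    (d : PySem.Dict String (PySem.Set String)) (t k' : String) :
    k' ∈ (gs.foldl
        (fun d kr => (kr.1 :: kr.2).foldl
          (fun d t => d.insert t (PySem.Set.add (d.getD t PySem.Set.empty) kr.1)) d) d).getD t PySem.Set.empty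
      ↔ k' ∈ d.getD t PySem.Set.empty ∨ ∃ p ∈ gs, k' = p.1 ∧ (t = p.1 ∨ t ∈ p.2) := by
  induction gs generalizing d with
  | nil => simp
  | cons g gs ih =>
    rw [List.foldl_cons, ih]
    simp only [mem_getD_inner, List.mem_cons]
    constructor
    · rintro ((h | ⟨rfl, (rfl | hm)⟩) | ⟨p, hp, h⟩)
      · exact .inl h
      · exact .inr ⟨g, .inl rfl, rfl, .inl rfl⟩
      · exact .inr ⟨g, .inl rfl, rfl, .inr hm⟩
      · exact .inr ⟨p, .inr hp, h⟩
    · rintro (h | ⟨p, (rfl | hp), rfl, hm⟩)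
      · exact .inl (.inl h)
      · rcases hm with rfl | hm
        · exact .inl (.inr ⟨rfl, .inl rfl⟩)
        · exact .inl (.inr ⟨rfl, .inr hm⟩)
      · exact .inr ⟨p, hp, rfl, hm⟩

lemma mem_groupsOf (t k' : String) :
    k' ∈ groupsOf.getD t PySem.Set.empty
      ↔ ∃ p ∈ relatedGroups, k' = p.1 ∧ (t = p.1 ∨ t ∈ p.2) := by
  unfold groupsOf
  rw [mem_getD_build]
  simp [PySem.Dict.getD_empty, PySem.Set.empty]

-- the ten group keys are pairwise distinct, so a key determines its group
lemma relatedGroups_keys_inj (p : String × List String) (hp : p ∈ relatedGroups)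
    (q : String × List String) (hq : q ∈ relatedGroups) (h : p.1 = q.1) : p = q := by
  fin_cases hp <;> fin_cases hq <;> simp_all

-- A's loop returns true iff some group (key ∪ related) contains both terms
lemma pyGroupLoop_iff (t1 t2 : String) (gs : List (String × List String)) :
    pyGroupLoop t1 t2 gs = true
      ↔ ∃ p ∈ gs, (t1 = p.1 ∨ t1 ∈ p.2) ∧ (t2 = p.1 ∨ t2 ∈ p.2) := by
  induction gs with
  | nil => simp [pyGroupLoop]
  | cons g gs ih =>
    obtain ⟨key, rel⟩ := g
    simp only [pyGroupLoop, List.mem_cons]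
    split_ifs with h1 h2
    · simp only [Bool.and_eq_true, List.contains_eq_mem, decide_eq_true_eq] at h1
      simp only [true_iff]
      exact ⟨(key, rel), .inl rfl, .inr h1.1, .inr h1.2⟩
    · simp only [Bool.and_eq_true, Bool.or_eq_true, beq_iff_eq, List.contains_eq_mem,
        decide_eq_true_eq] at h2
      simp only [true_iff]
      exact ⟨(key, rel), .inl rfl, h2.1, h2.2⟩
    · simp only [Bool.and_eq_true, Bool.or_eq_true, beq_iff_eq, List.contains_eq_mem,
        decide_eq_true_eq] at h1 h2
      rw [ih]
      constructor
      · rintro ⟨p, hp, h⟩; exact ⟨p, .inr hp, h⟩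
      · rintro ⟨p, (rfl | hp), h⟩
        · exact absurd ⟨h.1, h.2⟩ h2
        · exact ⟨p, hp, h⟩

-- the core: A's group scan equals B's index-lookup disjointness test
lemma loop_eq_not_disjoint (t1 t2 : String) :
    pyGroupLoop t1 t2 relatedGroups
      = !(PySem.Set.isdisjoint (groupsOf.getD t1 PySem.Set.empty) (groupsOf.getD t2 PySem.Set.empty)) := by
  cases hb : PySem.Set.isdisjoint (groupsOf.getD t1 PySem.Set.empty) (groupsOf.getD t2 PySem.Set.empty) with
  | true =>
    have hdis := (PySem.Set.isdisjoint_iff _ _).1 hb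
    simp only [Bool.not_true, Bool.eq_false_iff]
    intro hl
    obtain ⟨p, hp, h1, h2⟩ := (pyGroupLoop_iff t1 t2 relatedGroups).1 hl
    exact hdis p.1 ((mem_groupsOf t1 p.1).2 ⟨p, hp, rfl, h1⟩) ((mem_groupsOf t2 p.1).2 ⟨p, hp, rfl, h2⟩)
  | false =>
    have hne : ¬ ∀ x ∈ groupsOf.getD t1 PySem.Set.empty, x ∉ groupsOf.getD t2 PySem.Set.empty := by
      intro h
      rw [(PySem.Set.isdisjoint_iff _ _).2 h] at hb
      simp at hb
    simp only [not_forall, not_not, exists_prop] at hne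
    obtain ⟨k, hk1, hk2⟩ := hne
    obtain ⟨p, hp, rfl, h1⟩ := (mem_groupsOf t1 k).1 hk1
    obtain ⟨q, hq, hqk, h2⟩ := (mem_groupsOf t2 p.1).1 hk2
    have hpq : p = q := relatedGroups_keys_inj p hp q hq hqk
    simp only [Bool.not_false]
    exact (pyGroupLoop_iff t1 t2 relatedGroups).2 ⟨p, hp, h1, hpq ▸ h2⟩

-- ===== VERDICT (by name: the statement is the Claim_ definition above) =====
theorem are_terms_related_py_spec : Claim_equal_are_terms_related_py := by
  intro term1 term2 _
  unfold Spec_are_terms_related_py are_terms_related_py are_terms_related_py_alt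
  simp only [loop_eq_not_disjoint]
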